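-- pv_equiv track=rewrite | github.com/manwar/perlweeklychallenge-club | challenge-274/lubos-kolouch/python/ch-2.py | bus_route
-- ===== SOURCE A (Python) =====
-- from collections.abc import Sequence
--
-- Route = tuple[int, int, int]  # interval, offset, duration
--
-- def _next_departure(t: int, interval: int, offset: int) -> int:
--     if t <= offset:
--         return offset
--     k = (t - offset + interval - 1) // interval
--     return offset + k * interval
--
-- def bus_route(routes: Sequence[Route]) -> list[int]:
--     """Return minutes t (0..59) where waiting for a later bus gets you in sooner."""
--     if not routes:
--         raise ValueError("Expected at least one route")
--
--     bad: list[int] = []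
--     for t in range(60):
--         dmin: int | None = None
--         best_at_dmin: int | None = None
--         best_arrival: int | None = None
--         best_departure: int | None = None
--
--         for interval, offset, duration in routes:
--             dep = _next_departure(t, interval, offset)
--             arr = dep + duration
--
--             if dmin is None or dep < dmin:
--                 dmin = dep
--                 best_at_dmin = arr
--             elif dep == dmin:
--                 assert best_at_dmin is not None
--                 best_at_dmin = min(best_at_dmin, arr)
--
--             if best_arrival is None or arr < best_arrival:
--                 best_arrival = arr
--                 best_departure = dep
--
--         assert dmin is not None and best_at_dmin is not None and best_arrival is not None and best_departure is not None
--         if best_departure > dmin and best_arrival < best_at_dmin: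
--             bad.append(t)
--
--     return bad
-- ===== SOURCE B (Python) =====
-- def _next_departure(t, interval, offset):
--     if t <= offset:
--         return offset
--     k = (t - offset + interval - 1) // interval
--     return offset + k * interval
--
--
-- def bus_route(routes):
--     """Return minutes t (0..59) where waiting for a later bus gets you in sooner."""
--     if not routes:
--         raise ValueError("Expected at least one route")
--     bad = []
--     for t in range(60):
--         order = sorted(
--             (dep, dep + duration)
--             for interval, offset, duration in routes
--             for dep in (_next_departure(t, interval, offset),)
--         )
--         _, first_arr = order[0]
--         if any(arr < first_arr for _, arr in order):
--             bad.append(t)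
--     return bad
-- ===== Notes on version B (the rewrite author's own statement) =====
-- stated objective: alternative
-- what changed: B is sort-then-scan: it lexicographically sorts the (departure, arrival) pairs so the head of the sorted list directly is the earliest departure together with its best arrival, then a single any() scan detects a strictly earlier arrival; A instead runs a four-accumulator (dmin/best_at_dmin/best_arrival/best_departure) single-pass state machine with None sentinels and an extra departure comparison.
import Mathlib
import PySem

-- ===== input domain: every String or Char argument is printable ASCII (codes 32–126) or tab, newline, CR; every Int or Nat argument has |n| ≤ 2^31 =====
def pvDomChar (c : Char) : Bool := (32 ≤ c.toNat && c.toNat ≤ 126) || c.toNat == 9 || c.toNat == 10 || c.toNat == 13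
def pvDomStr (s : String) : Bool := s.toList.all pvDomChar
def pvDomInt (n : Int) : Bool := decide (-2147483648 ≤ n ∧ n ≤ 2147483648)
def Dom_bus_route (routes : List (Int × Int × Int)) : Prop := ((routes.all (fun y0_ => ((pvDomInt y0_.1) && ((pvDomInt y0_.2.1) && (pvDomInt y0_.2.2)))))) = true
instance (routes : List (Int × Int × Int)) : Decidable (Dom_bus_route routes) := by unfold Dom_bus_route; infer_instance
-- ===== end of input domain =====

-- B replaces A's four-accumulator state machine by sort-then-scan: it lexicographically sorts the
-- (departure, arrival) pairs and reads the earliest departure's best arrival off the head, then one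
-- any-scan detects an earlier arrival (objective: alternative algorithm; same order of cost modulo the sort).

-- ===== PORT A =====
-- shared helper _next_departure (also used verbatim by B's Python)
def nextDeparture (t interval offset : Int) : Int :=
  if t ≤ offset then offset
  else offset + PySem.Int.floordiv (t - offset + interval - 1) interval * interval

def bus_route (routes : List (Int × Int × Int)) : List Int :=
  (PySem.List.pyRange 0 60 1).foldl (fun bad t =>
    let st := routes.foldl
      (fun (s : Option Int × Option Int × Option Int × Option Int) r =>
        let dep := nextDeparture t r.1 r.2.1
        let arr := dep + r.2.2
        let s1 : Option Int × Option Int :=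
          match s.1, s.2.1 with
          | none, _ => (some dep, some arr)
          | some dm, bAt =>
            if dep < dm then (some dep, some arr)
            else if dep == dm then (some dm, bAt.map (fun b => min b arr))
            else (some dm, bAt)
        let s2 : Option Int × Option Int :=
          match s.2.2.1, s.2.2.2 with
          | none, _ => (some arr, some dep)
          | some ba, bd => if arr < ba then (some arr, some dep) else (some ba, bd)
        (s1.1, s1.2, s2.1, s2.2))
      (none, none, none, none)
    match st with
    | (some dmin, some bAt, some bArr, some bDep) =>
        if bDep > dmin ∧ bArr < bAt then bad ++ [t] else bad
    | _ => bad) []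

-- ===== PORT B =====
def bus_route_alt (routes : List (Int × Int × Int)) : List Int :=
  (PySem.List.pyRange 0 60 1).foldl (fun bad t =>
    let order := PySem.List.sorted2
      (routes.map (fun r =>
        let dep := nextDeparture t r.1 r.2.1
        (dep, dep + r.2.2)))
      Prod.fst Prod.snd
    match order with
    | [] => bad   -- unreachable under Pre_ (routes nonempty); Python's order[0] would raise IndexError
    | m :: _ =>
        if order.any (fun q => q.2 < m.2) then bad ++ [t] else bad) []

-- ===== PRECONDITION & SPEC =====
-- Pre_ excludes exactly the inputs where A raises: the empty list (ValueError) and any route with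
-- interval = 0 whose offset is < 59 (ZeroDivisionError in _next_departure); B raises there too.
def Pre_bus_route (routes : List (Int × Int × Int)) : Prop :=
  routes ≠ [] ∧ ∀ r ∈ routes, r.1 = 0 → (59 : Int) ≤ r.2.1
instance (routes : List (Int × Int × Int)) : Decidable (Pre_bus_route routes) := by
  unfold Pre_bus_route; infer_instance
def pvWitness_bus_route : (List (Int × Int × Int)) := [(10, 2, 5), (7, 0, 3)]

def Spec_bus_route (routes : List (Int × Int × Int)) (out : List Int) : Prop := out = bus_route_alt routes
instance (routes : List (Int × Int × Int)) (out : List Int) : Decidable (Spec_bus_route routes out) := by unfold Spec_bus_route; infer_instance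

-- ===== CLAIM (what is proved, stated in full; the proofs are below) =====
def Claim_equal_bus_route : Prop := ∀ (routes : List (Int × Int × Int)), Dom_bus_route routes → Pre_bus_route routes → Spec_bus_route routes (bus_route routes)

-- ===== LEMMAS AND PROOFS =====

-- the body of A's inner loop, as a step function on the (departure, arrival) pair
def pvStep (s : Option Int × Option Int × Option Int × Option Int) (p : Int × Int) :
    Option Int × Option Int × Option Int × Option Int :=
  let s1 : Option Int × Option Int :=
    match s.1, s.2.1 with
    | none, _ => (some p.1, some p.2)
    | some dm, bAt =>
      if p.1 < dm then (some p.1, some p.2)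
      else if p.1 == dm then (some dm, bAt.map (fun b => min b p.2))
      else (some dm, bAt)
  let s2 : Option Int × Option Int :=
    match s.2.2.1, s.2.2.2 with
    | none, _ => (some p.2, some p.1)
    | some ba, bd => if p.2 < ba then (some p.2, some p.1) else (some ba, bd)
  (s1.1, s1.2, s2.1, s2.2)

def pvPairs (t : Int) (routes : List (Int × Int × Int)) : List (Int × Int) :=
  routes.map (fun r =>
    let dep := nextDeparture t r.1 r.2.1
    (dep, dep + r.2.2))

-- lexicographic "≤" on (departure, arrival) pairs: the order B's Python sort uses
def pvLexLe (a b : Int × Int) : Prop := a.1 < b.1 ∨ (a.1 = b.1 ∧ a.2 ≤ b.2)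

lemma pvLexLe_trans {a b c : Int × Int} (h1 : pvLexLe a b) (h2 : pvLexLe b c) : pvLexLe a c := by
  unfold pvLexLe at *; omega

-- the comparison sorted2 Prod.fst Prod.snd actually inserts with
lemma pvLexLe_of_not_lt {a b : Int × Int}
    (h : ¬ ((decide (b.1 < a.1) || (!decide (a.1 < b.1) && decide (b.2 < a.2))) = true)) :
    pvLexLe a b := by
  simp only [Bool.or_eq_true, Bool.and_eq_true, Bool.not_eq_true', decide_eq_true_eq,
    decide_eq_false_iff_not, not_or, not_and] at h
  unfold pvLexLe; omega

lemma pvLexLe_of_lt {a b : Int × Int}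
    (h : (decide (a.1 < b.1) || (!decide (b.1 < a.1) && decide (a.2 < b.2))) = true) :
    pvLexLe a b := by
  simp only [Bool.or_eq_true, Bool.and_eq_true, Bool.not_eq_true', decide_eq_true_eq,
    decide_eq_false_iff_not] at h
  unfold pvLexLe; omega

lemma insertBy_lex_pairwise (x : Int × Int) (acc : List (Int × Int))
    (h : acc.Pairwise pvLexLe) :
    (PySem.List.insertBy
      (fun a b => decide (a.1 < b.1) || (!decide (b.1 < a.1) && decide (a.2 < b.2))) x acc).Pairwise pvLexLe := by
  induction acc with
  | nil => simp [PySem.List.insertBy]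
  | cons y ys ih =>
    rw [List.pairwise_cons] at h
    obtain ⟨hy, hys⟩ := h
    unfold PySem.List.insertBy
    split
    · rename_i hlt
      refine List.Pairwise.cons ?_ (List.Pairwise.cons hy hys)
      intro z hz
      rcases List.mem_cons.mp hz with rfl | hz
      · exact pvLexLe_of_lt hlt
      · exact pvLexLe_trans (pvLexLe_of_lt hlt) (hy z hz)
    · rename_i hnlt
      refine List.Pairwise.cons ?_ (ih hys)
      intro z hz
      rcases (PySem.List.mem_insertBy _ _ _ _).mp hz with rfl | hz
      · exact pvLexLe_of_not_lt hnlt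
      · exact hy z hz
  
lemma sorted2_lex_pairwise (xs : List (Int × Int)) :
    (PySem.List.sorted2 xs Prod.fst Prod.snd).Pairwise pvLexLe := by
  unfold PySem.List.sorted2
  simp only [if_neg (by decide : ¬ (false = true))]
  suffices h : ∀ acc : List (Int × Int), acc.Pairwise pvLexLe →
      (xs.foldl (fun acc x => PySem.List.insertBy
        (fun a b => decide (a.1 < b.1) || (!decide (b.1 < a.1) && decide (a.2 < b.2))) x acc) acc).Pairwise pvLexLe by
    exact h [] List.Pairwise.nil
  induction xs with
  | nil => intro acc h; exact h
  | cons x xs ih =>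
    intro acc h
    exact ih _ (insertBy_lex_pairwise x acc h)

-- the head of the sorted pair list is lexicographically least among all pairs
lemma head_sorted2_lex_min (xs : List (Int × Int)) (m : Int × Int) (t : List (Int × Int))
    (h : PySem.List.sorted2 xs Prod.fst Prod.snd = m :: t) :
    m ∈ xs ∧ ∀ y ∈ xs, pvLexLe m y := by
  have hperm : (PySem.List.sorted2 xs Prod.fst Prod.snd).Perm xs :=
    PySem.List.sorted2_perm xs Prod.fst Prod.snd false
  have hpw := sorted2_lex_pairwise xs
  rw [h] at hperm hpw
  rw [List.pairwise_cons] at hpw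
  constructor
  · exact hperm.mem_iff.mp (by simp)
  · intro y hy
    rcases List.mem_cons.mp (hperm.mem_iff.mpr hy) with h1 | h2
    · exact h1 ▸ Or.inr ⟨rfl, le_refl _⟩
    · exact hpw.1 y h2

lemma foldA_eq_foldStep (t : Int) (routes : List (Int × Int × Int))
    (init : Option Int × Option Int × Option Int × Option Int) :
    routes.foldl
      (fun (s : Option Int × Option Int × Option Int × Option Int) r =>
        let dep := nextDeparture t r.1 r.2.1
        let arr := dep + r.2.2
        let s1 : Option Int × Option Int :=
          match s.1, s.2.1 with
          | none, _ => (some dep, some arr)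
          | some dm, bAt =>
            if dep < dm then (some dep, some arr)
            else if dep == dm then (some dm, bAt.map (fun b => min b arr))
            else (some dm, bAt)
        let s2 : Option Int × Option Int :=
          match s.2.2.1, s.2.2.2 with
          | none, _ => (some arr, some dep)
          | some ba, bd => if arr < ba then (some arr, some dep) else (some ba, bd)
        (s1.1, s1.2, s2.1, s2.2)) init
    = (pvPairs t routes).foldl pvStep init := by
  induction routes generalizing init with
  | nil => rfl
  | cons r rs ih => simp only [List.foldl_cons, pvPairs, List.map_cons] at *; rw [ih]; rfl

lemma min?_append_singleton (xs : List Int) (m y : Int)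
    (h : PySem.List.min? xs (fun z => z) = some m) :
    PySem.List.min? (xs ++ [y]) (fun z => z) = some (min m y) := by
  cases xs with
  | nil => simp [PySem.List.min?] at h
  | cons c t =>
    rw [PySem.List.min?_id_cons] at h
    injection h with h
    subst h
    rw [List.cons_append, PySem.List.min?_id_cons, List.foldl_append]
    rfl

lemma pvFold_spec (l : List (Int × Int)) (p : Int × Int) :
    ∃ am bd : Int,
      (p :: l).foldl pvStep (none, none, none, none) =
        (some ((l.map Prod.fst).foldl min p.1), some am,
         some ((l.map Prod.snd).foldl min p.2), some bd)
      ∧ PySem.List.min?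
          (((p :: l).filter (fun x => x.1 == (l.map Prod.fst).foldl min p.1)).map Prod.snd)
          (fun y => y) = some am
      ∧ (bd, (l.map Prod.snd).foldl min p.2) ∈ p :: l := by
  induction l using List.reverseRecOn with
  | nil =>
    refine ⟨p.2, p.1, rfl, ?_, by simp⟩
    simp [PySem.List.min?_id_cons]
  | append_singleton l q ih =>
    obtain ⟨am, bd, heq, hmin, hmem⟩ := ih
    have hminfst : PySem.List.min? ((p :: l).map Prod.fst) (fun y => y)
        = some ((l.map Prod.fst).foldl min p.1) := by
      rw [List.map_cons, PySem.List.min?_id_cons]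
    have hdm : ∀ x ∈ p :: l, (l.map Prod.fst).foldl min p.1 ≤ x.1 := fun x hx =>
      PySem.List.min?_isMin hminfst x.1 (List.mem_map_of_mem hx)
    have hdm' : ((l ++ [q]).map Prod.fst).foldl min p.1
        = min ((l.map Prod.fst).foldl min p.1) q.1 := by
      rw [List.map_append, List.foldl_append]; rfl
    have hba' : ((l ++ [q]).map Prod.snd).foldl min p.2
        = min ((l.map Prod.snd).foldl min p.2) q.2 := by
      rw [List.map_append, List.foldl_append]; rfl
    have hfold : (p :: (l ++ [q])).foldl pvStep (none, none, none, none)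
        = pvStep ((p :: l).foldl pvStep (none, none, none, none)) q := by
      rw [← List.cons_append, List.foldl_append]; rfl
    set dm := (l.map Prod.fst).foldl min p.1 with hdmdef
    set ba := (l.map Prod.snd).foldl min p.2 with hbadef
    refine ⟨if q.1 < dm then q.2 else if q.1 = dm then min am q.2 else am,
            if q.2 < ba then q.1 else bd, ?_, ?_, ?_⟩
    · rw [hfold, heq, hdm', hba']
      unfold pvStep
      rcases lt_trichotomy q.1 dm with hlt | heqq | hgt
      · rw [min_eq_right hlt.le]
        by_cases h2 : q.2 < ba
        · rw [min_eq_right h2.le]; simp [hlt, h2]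
        · rw [min_eq_left (not_lt.mp h2)]; simp [hlt, h2]
      · rw [heqq, min_self]
        by_cases h2 : q.2 < ba
        · rw [min_eq_right h2.le]; simp [h2]
        · rw [min_eq_left (not_lt.mp h2)]; simp [h2]
      · rw [min_eq_left hgt.le]
        have h3 : ¬ q.1 < dm := by omega
        have h4 : ¬ q.1 = dm := by omega
        by_cases h2 : q.2 < ba
        · rw [min_eq_right h2.le]
          simp [h2, h3, h4]
        · rw [min_eq_left (not_lt.mp h2)]
          simp [h2, h3, h4]
    · rw [hdm']
      rcases lt_trichotomy q.1 dm with hlt | heqq | hgt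
      · have hnil : (p :: l).filter (fun x => x.1 == min dm q.1) = [] := by
          rw [min_eq_right hlt.le]
          refine List.filter_eq_nil_iff.mpr fun x hx => ?_
          have := hdm x hx
          simp only [beq_iff_eq]; omega
        rw [← List.cons_append, List.filter_append, hnil, List.nil_append]
        have : q.1 == min dm q.1 := by simp [min_eq_right hlt.le]
        simp only [List.filter_cons, this, if_pos, List.filter_nil]
        simp [hlt, PySem.List.min?_id_cons]
      · have hq : q.1 == min dm q.1 := by simp [heqq]
        rw [← List.cons_append, List.filter_append]
        have hrest : [q].filter (fun x => x.1 == min dm q.1) = [q] := by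
          simp [hq]
        rw [hrest]
        have hkeep : (p :: l).filter (fun x => x.1 == min dm q.1)
            = (p :: l).filter (fun x => x.1 == dm) := by
          rw [heqq, min_self]
        rw [hkeep, List.map_append]
        have := min?_append_singleton _ am q.2 hmin
        simp only [List.map_cons, List.map_nil] at this ⊢
        rw [this]
        simp [heqq]
      · have hq : ¬ (q.1 == min dm q.1) = true := by
          simp [min_eq_left hgt.le]; omega
        rw [← List.cons_append, List.filter_append]
        have hrest : [q].filter (fun x => x.1 == min dm q.1) = [] := by
          simp only [List.filter_cons, List.filter_nil]
          rw [if_neg hq]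
        rw [hrest, List.append_nil]
        have hkeep : (p :: l).filter (fun x => x.1 == min dm q.1)
            = (p :: l).filter (fun x => x.1 == dm) := by
          rw [min_eq_left hgt.le]
        rw [hkeep, hmin, if_neg (by omega : ¬ q.1 < dm), if_neg (by omega : ¬ q.1 = dm)]
    · rw [hba']
      by_cases hlt : q.2 < ba
      · rw [if_pos hlt, min_eq_right hlt.le, ← List.cons_append]
        exact List.mem_append_right _ (by simp)
      · rw [if_neg hlt, min_eq_left (not_lt.mp hlt), ← List.cons_append]
        exact List.mem_append_left _ hmem

-- A's per-minute decision equals B's sort-then-scan decision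
lemma per_minute (l : List (Int × Int)) (p : Int × Int) (bad : List Int) (t : Int) :
    (match (p :: l).foldl pvStep (none, none, none, none) with
     | (some dmin, some bAt, some bArr, some bDep) =>
         if bDep > dmin ∧ bArr < bAt then bad ++ [t] else bad
     | _ => bad)
    = (match PySem.List.sorted2 (p :: l) Prod.fst Prod.snd with
       | [] => bad
       | m :: _ =>
           if (PySem.List.sorted2 (p :: l) Prod.fst Prod.snd).any (fun q => q.2 < m.2)
           then bad ++ [t] else bad) := by
  obtain ⟨am, bd, heq, hmin, hmem⟩ := pvFold_spec l p
  set dm := (l.map Prod.fst).foldl min p.1 with hdmdef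
  set ba := (l.map Prod.snd).foldl min p.2 with hbadef
  have hminfst : PySem.List.min? ((p :: l).map Prod.fst) (fun y => y) = some dm := by
    rw [List.map_cons, PySem.List.min?_id_cons]
  have hminsnd : PySem.List.min? ((p :: l).map Prod.snd) (fun y => y) = some ba := by
    rw [List.map_cons, PySem.List.min?_id_cons]
  cases hsorted : PySem.List.sorted2 (p :: l) Prod.fst Prod.snd with
  | nil =>
    have hperm := PySem.List.sorted2_perm (p :: l) Prod.fst Prod.snd false
    rw [hsorted] at hperm
    simpa using hperm.length_eq
  | cons m tl =>
    obtain ⟨hm_mem, hm_le⟩ := head_sorted2_lex_min (p :: l) m tl hsorted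
    have hdm_le : ∀ x ∈ p :: l, dm ≤ x.1 := fun x hx =>
      PySem.List.min?_isMin hminfst x.1 (List.mem_map_of_mem hx)
    have hm1 : m.1 = dm := by
      obtain ⟨y, hy, hy2⟩ := List.mem_map.mp (PySem.List.min?_mem hminfst)
      have h1 := hdm_le m hm_mem
      have h2 := hm_le y hy
      unfold pvLexLe at h2; omega
    have hm2 : m.2 = am := by
      have hmfilter : m ∈ (p :: l).filter (fun x => x.1 == dm) :=
        List.mem_filter.mpr ⟨hm_mem, by simp [hm1]⟩
      have h1 : am ≤ m.2 := PySem.List.min?_isMin hmin m.2 (List.mem_map_of_mem hmfilter)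
      obtain ⟨q, hq, hq2⟩ := List.mem_map.mp (PySem.List.min?_mem hmin)
      obtain ⟨hqP, hq1⟩ := List.mem_filter.mp hq
      have h2 := hm_le q hqP
      unfold pvLexLe at h2
      simp only [beq_iff_eq] at hq1
      omega
    have hany : ((m :: tl).any (fun q => decide (q.2 < m.2))) = decide (ba < am) := by
      by_cases hlt : ba < am
      · simp only [hlt, decide_true]
        obtain ⟨y, hyP, hy2⟩ := List.mem_map.mp (PySem.List.min?_mem hminsnd)
        have hy_in : y ∈ m :: tl := by
          rw [← hsorted]
          exact (PySem.List.sorted2_perm (p :: l) Prod.fst Prod.snd false).mem_iff.mpr hyP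
        rw [List.any_eq_true]
        exact ⟨y, hy_in, by simp [hy2, hm2, hlt]⟩
      · simp only [hlt, decide_false]
        rw [List.any_eq_false]
        intro q hq
        have hqP : q ∈ p :: l :=
          (PySem.List.sorted2_perm (p :: l) Prod.fst Prod.snd false).mem_iff.mp
            (by rw [hsorted]; exact hq)
        have := PySem.List.min?_isMin hminsnd q.2 (List.mem_map_of_mem hqP)
        simp only [decide_eq_true_eq, not_lt] at *
        omega
    have hbdge : dm ≤ bd := hdm_le _ hmem
    have hkey : ba < am → dm < bd := by
      intro hlt
      rcases lt_or_eq_of_le hbdge with h | h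
      · exact h
      · exfalso
        have hmemf : (bd, ba) ∈ (p :: l).filter (fun x => x.1 == dm) :=
          List.mem_filter.mpr ⟨hmem, by simp [← h]⟩
        have : am ≤ ba := PySem.List.min?_isMin hmin ba (List.mem_map_of_mem hmemf)
        omega
    rw [heq]
    show (if bd > dm ∧ ba < am then bad ++ [t] else bad)
        = if ((m :: tl).any (fun q => decide (q.2 < m.2))) = true then bad ++ [t] else bad
    rw [hany]
    by_cases hc : ba < am
    · rw [if_pos ⟨hkey hc, hc⟩]; simp [hc]
    · rw [if_neg (fun h => hc h.2)]; simp [hc]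

-- ===== VERDICT (by name: the statement is the Claim_ definition above) =====
theorem bus_route_spec : Claim_equal_bus_route := by
  intro routes hdom hpre
  obtain ⟨hne, -⟩ := hpre
  obtain ⟨r, rs, rfl⟩ := List.exists_cons_of_ne_nil hne
  unfold Spec_bus_route bus_route bus_route_alt
  apply List.foldl_ext
  intro bad t ht
  rw [foldA_eq_foldStep t (r :: rs)]
  exact per_minute (pvPairs t rs)
    (nextDeparture t r.1 r.2.1, nextDeparture t r.1 r.2.1 + r.2.2) bad t
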